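-- pv_equiv track=rewrite | github.com/janniswi00/Pythonkurs | functions.py | FrequencyTable
-- ===== SOURCE A (Python) =====
-- def FrequencyTable(text, k):
--     freq_map = {}
--     n = len(text)
--
--     for i in range(n-k+1):
--         pattern = text[i:i+k]
--         if pattern not in freq_map.keys():
--             freq_map[pattern] = 1
--         else:
--             freq_map[pattern] += 1
--
--     return freq_map
-- ===== SOURCE B (Python) =====
-- def FrequencyTable(text, k):
--     subs = [text[i:i+k] for i in range(len(text) - k + 1)]
--     return {p: subs.count(p) for p in dict.fromkeys(subs)}
-- ===== Notes on version B (the rewrite author's own statement) =====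
-- stated objective: idiomatic
-- what changed: Replaces the imperative contains-check/increment dict loop by a declarative pipeline: build the list of length-k slices once, deduplicate it in first-occurrence order with dict.fromkeys, and map each distinct substring to its total list.count in a dict comprehension.
import Mathlib
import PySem

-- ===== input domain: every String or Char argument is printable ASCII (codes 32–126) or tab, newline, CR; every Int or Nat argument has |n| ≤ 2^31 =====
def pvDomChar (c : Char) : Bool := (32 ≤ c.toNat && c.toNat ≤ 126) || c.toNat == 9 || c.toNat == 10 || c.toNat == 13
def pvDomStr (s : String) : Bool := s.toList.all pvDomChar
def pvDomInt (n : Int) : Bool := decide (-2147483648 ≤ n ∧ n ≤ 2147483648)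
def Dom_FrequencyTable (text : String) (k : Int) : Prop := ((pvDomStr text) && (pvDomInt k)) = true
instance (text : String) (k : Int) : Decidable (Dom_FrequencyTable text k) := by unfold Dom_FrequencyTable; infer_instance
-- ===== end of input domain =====

-- B replaces A's imperative contains-check/increment dict loop by dedup-then-count (same return value; no speed claim).

-- ===== PORT A =====
def FrequencyTable (text : String) (k : Int) : List (String × Int) :=
  let n : Int := PySem.Str.len text
  let freq_map : PySem.Dict String Int :=
    (PySem.List.pyRange 0 (n - k + 1) 1).foldl
      (fun freq_map i =>
        let pattern := PySem.Str.slice text (some i) (some (i + k))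
        if freq_map.contains pattern = false then
          freq_map.insert pattern 1
        else
          freq_map.insert pattern (freq_map.getD pattern 0 + 1))
      PySem.Dict.empty
  freq_map.items

-- ===== PORT B =====
def FrequencyTable_alt (text : String) (k : Int) : List (String × Int) :=
  let subs := (PySem.List.pyRange 0 (PySem.Str.len text - k + 1) 1).map
      (fun i => PySem.Str.slice text (some i) (some (i + k)))
  (PySem.List.dedup subs).map (fun p => (p, (subs.count p : Int)))

-- ===== PRECONDITION & SPEC =====
def Spec_FrequencyTable (text : String) (k : Int) (out : List (String × Int)) : Prop := out = FrequencyTable_alt text k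
instance (text : String) (k : Int) (out : List (String × Int)) : Decidable (Spec_FrequencyTable text k out) := by unfold Spec_FrequencyTable; infer_instance

-- ===== CLAIM (what is proved, stated in full; the proofs are below) =====
def Claim_equal_FrequencyTable : Prop := ∀ (text : String) (k : Int), Dom_FrequencyTable text k → Spec_FrequencyTable text k (FrequencyTable text k)

-- ===== LEMMAS AND PROOFS =====

theorem foldl_map_step {α β γ : Type} (g : β → γ) (f : α → γ → α) (l : List β) (init : α) :
    (l.map g).foldl f init = l.foldl (fun a b => f a (g b)) init := by
  induction l generalizing init with
  | nil => rfl
  | cons x xs ih => simp [List.foldl_cons, ih]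

-- A's loop body is exactly the insert-getD counting step: if absent, getD is 0, so insert 1 = insert (0+1).
theorem freq_step_eq (d : PySem.Dict String Int) (p : String) :
    (if d.contains p = false then d.insert p 1 else d.insert p (d.getD p 0 + 1))
      = d.insert p (d.getD p 0 + 1) := by
  by_cases h : d.contains p = false
  · simp [h, PySem.Dict.getD_of_not_contains (h := h)]
  · simp [h]

-- ===== VERDICT (by name: the statement is the Claim_ definition above) =====
theorem FrequencyTable_spec : Claim_equal_FrequencyTable := by
  intro text k _
  unfold Spec_FrequencyTable FrequencyTable FrequencyTable_alt
  simp only []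
  rw [show (List.foldl
        (fun (freq_map : PySem.Dict String Int) i =>
          if freq_map.contains (PySem.Str.slice text (some i) (some (i + k))) = false then
            freq_map.insert (PySem.Str.slice text (some i) (some (i + k))) 1
          else
            freq_map.insert (PySem.Str.slice text (some i) (some (i + k)))
              (freq_map.getD (PySem.Str.slice text (some i) (some (i + k))) 0 + 1))
        PySem.Dict.empty (PySem.List.pyRange 0 (PySem.Str.len text - k + 1) 1))
      = List.foldl
        (fun (freq_map : PySem.Dict String Int) p =>
          if freq_map.contains p = false then freq_map.insert p 1
          else freq_map.insert p (freq_map.getD p 0 + 1))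
        PySem.Dict.empty
        ((PySem.List.pyRange 0 (PySem.Str.len text - k + 1) 1).map
          (fun i => PySem.Str.slice text (some i) (some (i + k))))
    from (foldl_map_step (fun i => PySem.Str.slice text (some i) (some (i + k)))
      (fun (freq_map : PySem.Dict String Int) p =>
        if freq_map.contains p = false then freq_map.insert p 1
        else freq_map.insert p (freq_map.getD p 0 + 1))
      (PySem.List.pyRange 0 (PySem.Str.len text - k + 1) 1) PySem.Dict.empty).symm]
  simp only [freq_step_eq]
  rw [PySem.Dict.foldl_insert_getD_add_one_eq_counter, PySem.Dict.items_counter]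
  simp [PySem.List.dedup_eq_ofList]
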